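-- pv_equiv track=rewrite | github.com/paiml/depyler | examples/hard_wave3_027.py | csv_field_count
-- ===== SOURCE A (Python) =====
-- def csv_field_count(line: str) -> int:
--     """Count fields in a simple CSV line."""
--     if len(line) == 0:
--         return 0
--     count: int = 1
--     i: int = 0
--     while i < len(line):
--         if line[i] == ",":
--             count += 1
--         i += 1
--     return count
-- ===== SOURCE B (Python) =====
-- def csv_field_count(line: str) -> int:
--     """Count fields in a simple CSV line."""
--     if not line:
--         return 0
--     return len(line.split(","))
-- ===== Notes on version B (the rewrite author's own statement) =====
-- stated objective: simpler
-- what changed: B splits the line into its list of fields and returns that list's length instead of scanning characters one by one with an index and a comma counter.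
import Mathlib
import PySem

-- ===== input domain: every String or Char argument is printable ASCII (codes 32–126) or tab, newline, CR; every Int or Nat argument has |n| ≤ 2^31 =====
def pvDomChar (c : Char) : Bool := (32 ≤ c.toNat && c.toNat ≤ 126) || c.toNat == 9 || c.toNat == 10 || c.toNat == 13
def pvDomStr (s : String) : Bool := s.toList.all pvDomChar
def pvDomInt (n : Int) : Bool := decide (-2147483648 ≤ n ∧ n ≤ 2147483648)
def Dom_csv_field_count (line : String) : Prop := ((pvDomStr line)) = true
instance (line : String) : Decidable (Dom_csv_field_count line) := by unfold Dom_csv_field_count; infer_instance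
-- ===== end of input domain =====

-- B counts the fields by materializing them (split on "," and take the length) instead of A's
-- indexed character scan with a comma counter; same value everywhere, objective: simpler.

-- ===== PORT A =====
-- the while loop of A: walk the characters left to right, bumping count at each ','
def csvLoopA : List Char → Int → Int
  | [], count => count
  | c :: rest, count => csvLoopA rest (if c = ',' then count + 1 else count)

def csv_field_count (line : String) : Int :=
  if PySem.Str.len line = 0 then 0
  else csvLoopA line.toList 1

-- ===== PORT B =====
def csv_field_count_alt (line : String) : Int :=
  if PySem.Str.len line = 0 then 0
  else (PySem.Chars.splitOn line.toList ",".toList).length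

-- ===== PRECONDITION & SPEC =====
def Spec_csv_field_count (line : String) (out : Int) : Prop := out = csv_field_count_alt line
instance (line : String) (out : Int) : Decidable (Spec_csv_field_count line out) := by unfold Spec_csv_field_count; infer_instance

-- ===== CLAIM (what is proved, stated in full; the proofs are below) =====
def Claim_equal_csv_field_count : Prop := ∀ (line : String), Dom_csv_field_count line → Spec_csv_field_count line (csv_field_count line)

-- ===== LEMMAS AND PROOFS =====

-- A's loop adds the number of commas to its accumulator
theorem csvLoopA_eq (cs : List Char) (count : Int) :
    csvLoopA cs count = count + cs.count ',' := by
  induction cs generalizing count with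
  | nil => simp [csvLoopA]
  | cons c rest ih =>
      by_cases h : c = ','
      · simp [csvLoopA, h, ih]; ring
      · simp [csvLoopA, h, ih]

-- splitOn.go with the single-char separator [','] produces one piece per comma (plus one)
theorem splitOn_go_comma (fuel : Nat) (l cur : List Char) (acc : List (List Char))
    (h : l.length ≤ fuel) :
    (PySem.Chars.splitOn.go [','] fuel l cur acc).length
      = acc.length + 1 + l.count ',' := by
  induction fuel generalizing l cur acc with
  | zero =>
      have : l = [] := List.eq_nil_of_length_eq_zero (Nat.le_zero.mp h)
      subst this
      simp [PySem.Chars.splitOn.go]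
  | succ fuel ih =>
      cases l with
      | nil => simp [PySem.Chars.splitOn.go]
      | cons c rest =>
          have hr : rest.length ≤ fuel := by simpa using Nat.lt_succ_iff.mp (by simpa using h)
          by_cases hc : c = ','
          · subst hc
            simp [PySem.Chars.splitOn.go, List.isPrefixOf, ih _ _ _ hr]
            ring
          · have hc' : ¬(',' = c) := fun e => hc e.symm
            simp [PySem.Chars.splitOn.go, List.isPrefixOf, hc, hc', ih _ _ _ hr]

theorem splitOn_comma_length (cs : List Char) :
    (PySem.Chars.splitOn cs [',']).length = cs.count ',' + 1 := by
  unfold PySem.Chars.splitOn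
  rw [splitOn_go_comma _ _ _ _ (Nat.le_succ _)]
  simp; ring

-- ===== VERDICT (by name: the statement is the Claim_ definition above) =====
theorem csv_field_count_spec : Claim_equal_csv_field_count := by
  intro line _
  unfold Spec_csv_field_count csv_field_count csv_field_count_alt
  by_cases h : PySem.Str.len line = 0
  · rw [if_pos h, if_pos h]
  · have hsep : (",".toList) = [','] := rfl
    rw [if_neg h, if_neg h, csvLoopA_eq, hsep, splitOn_comma_length]
    push_cast; ring
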